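-- pv_equiv track=rewrite | github.com/nguyen-cong-tri/vn30-clustered-portfolio-optimization | tests/test_cluster_insight_notebook_contract.py | _output_contains_relative_path
-- ===== SOURCE A (Python) =====
-- def _normalize_path_text(text: str) -> str:
--     return text.lower().replace("\\", "/")
--
-- def _output_contains_relative_path(output_text: str, relative_path: str) -> bool:
--     normalized_relative_path = _normalize_path_text(relative_path)
--     relative_parts = [part for part in normalized_relative_path.split("/") if part]
--
--     return any(
--         any(
--             line_parts[start : start + len(relative_parts)] == relative_parts
--             for start in range(len(line_parts) - len(relative_parts) + 1)
--         )
--         for line_parts in (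
--             [part for part in _normalize_path_text(line).split("/") if part]
--             for line in output_text.splitlines()
--         )
--     )
-- ===== SOURCE B (Python) =====
-- def _normalize_path_text(text: str) -> str:
--     return text.lower().replace("\\", "/")
--
--
-- def _output_contains_relative_path(output_text: str, relative_path: str) -> bool:
--     parts = [part for part in _normalize_path_text(relative_path).split("/") if part]
--     lines = output_text.splitlines()
--     if not parts:
--         return bool(lines)
--     pattern = "/" + "/".join(parts) + "/"
--     for line in lines:
--         line_parts = [part for part in _normalize_path_text(line).split("/") if part]
--         if pattern in "/" + "/".join(line_parts) + "/":
--             return True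
--     return False
-- ===== Notes on version B (the rewrite author's own statement) =====
-- stated objective: idiomatic
-- what changed: Replaces A's explicit sliding-window comparison of token slices (any over range with list-slice equality) by joining the tokens of each line into a '/'-delimited string and using a single substring test 'pattern in s'; the empty-pattern degenerate case is handled up front.
import Mathlib
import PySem

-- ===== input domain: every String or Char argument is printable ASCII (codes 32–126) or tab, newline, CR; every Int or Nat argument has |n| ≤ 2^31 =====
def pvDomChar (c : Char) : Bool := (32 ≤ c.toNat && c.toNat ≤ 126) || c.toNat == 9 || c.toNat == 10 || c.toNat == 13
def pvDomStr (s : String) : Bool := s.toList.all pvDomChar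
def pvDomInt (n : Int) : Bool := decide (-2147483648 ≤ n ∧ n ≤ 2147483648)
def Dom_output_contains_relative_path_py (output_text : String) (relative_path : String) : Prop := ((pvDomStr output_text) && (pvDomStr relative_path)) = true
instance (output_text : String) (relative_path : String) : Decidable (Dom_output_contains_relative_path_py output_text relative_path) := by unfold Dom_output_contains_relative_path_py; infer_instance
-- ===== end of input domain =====

-- B replaces A's sliding-window comparison of token slices by a single '/'-delimited
-- substring test per line (idiomatic); return values proved equal on all inputs.

-- ===== PORT A =====
-- shared helper _normalize_path_text (used verbatim by both Pythons)
def pv_normalize (text : String) : String :=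
  PySem.Str.replace (PySem.Str.lower text) "\\" "/"

-- shared comprehension '[part for part in s.split("/") if part]' (appears verbatim in both Pythons)
def pv_tokens (s : String) : List String :=
  ((PySem.Str.split? s "/").getD []).filter (fun part => part != "")

def output_contains_relative_path_py (output_text : String) (relative_path : String) : Bool :=
  let normalized_relative_path := pv_normalize relative_path
  let relative_parts := pv_tokens normalized_relative_path
  ((PySem.Str.splitlines output_text).map (fun line => pv_tokens (pv_normalize line))).any
    (fun line_parts =>
      (PySem.List.pyRange 0 ((line_parts.length : Int) - (relative_parts.length : Int) + 1) 1).any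
        (fun start =>
          PySem.List.slice line_parts (some start) (some (start + (relative_parts.length : Int))) == relative_parts))

-- ===== PORT B =====
def output_contains_relative_path_py_alt (output_text : String) (relative_path : String) : Bool :=
  let parts := pv_tokens (pv_normalize relative_path)
  let lines := PySem.Str.splitlines output_text
  if parts.isEmpty then !lines.isEmpty
  else
    let pattern := "/" ++ PySem.Str.join "/" parts ++ "/"
    lines.any (fun line =>
      let line_parts := pv_tokens (pv_normalize line)
      PySem.Str.isIn pattern ("/" ++ PySem.Str.join "/" line_parts ++ "/"))

-- ===== PRECONDITION & SPEC =====
def Spec_output_contains_relative_path_py (output_text : String) (relative_path : String) (out : Bool) : Prop := out = output_contains_relative_path_py_alt output_text relative_path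
instance (output_text : String) (relative_path : String) (out : Bool) : Decidable (Spec_output_contains_relative_path_py output_text relative_path out) := by unfold Spec_output_contains_relative_path_py; infer_instance

-- ===== CLAIM (what is proved, stated in full; the proofs are below) =====
def Claim_equal_output_contains_relative_path_py : Prop := ∀ (output_text : String) (relative_path : String), Dom_output_contains_relative_path_py output_text relative_path → Spec_output_contains_relative_path_py output_text relative_path (output_contains_relative_path_py output_text relative_path)

-- ===== LEMMAS AND PROOFS =====

-- flatten a token list with a '/' after every token
def pvFlat (X : List (List Char)) : List Char := X.flatMap (fun t => t ++ ['/'])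

lemma pvFlat_nil : pvFlat [] = [] := rfl

lemma pvFlat_cons (t : List Char) (X : List (List Char)) :
    pvFlat (t :: X) = t ++ '/' :: pvFlat X := by
  simp [pvFlat]

lemma pvFlat_append (u v : List (List Char)) : pvFlat (u ++ v) = pvFlat u ++ pvFlat v := by
  simp [pvFlat]

lemma pvFlat_eq_nil_iff (X : List (List Char)) : pvFlat X = [] ↔ X = [] := by
  cases X with
  | nil => simp [pvFlat]
  | cons t ts => simp [pvFlat_cons]

-- flat of a nonempty token list ends with '/'
lemma pvFlat_snoc (u : List (List Char)) (hu : u ≠ []) : ∃ w, pvFlat u = w ++ ['/'] := by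
  induction u with
  | nil => simp at hu
  | cons t ts ih =>
    cases ts with
    | nil => exact ⟨t, by simp [pvFlat]⟩
    | cons a b =>
      obtain ⟨w, hw⟩ := ih (by simp)
      exact ⟨t ++ '/' :: w, by simp [pvFlat_cons, hw]⟩

-- boundary alignment: '/'-free heads before a '/' must coincide
lemma pvLemD (a : List Char) : ∀ (b x y : List Char), '/' ∉ a → '/' ∉ b →
    a ++ '/' :: x <+: b ++ '/' :: y → a = b ∧ x <+: y := by
  induction a with
  | nil =>
    intro b x y _ hb h
    cases b with
    | nil =>
      simp only [List.nil_append] at h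
      exact ⟨rfl, (List.cons_prefix_cons.mp h).2⟩
    | cons b0 bs =>
      simp only [List.nil_append, List.cons_append] at h
      obtain ⟨he, _⟩ := List.cons_prefix_cons.mp h
      simp only [List.mem_cons, not_or] at hb
      exact absurd he hb.1
  | cons a0 as ih =>
    intro b x y ha hb h
    cases b with
    | nil =>
      simp only [List.cons_append, List.nil_append] at h
      obtain ⟨he, _⟩ := List.cons_prefix_cons.mp h
      simp only [List.mem_cons, not_or] at ha
      exact absurd he.symm ha.1
    | cons b0 bs =>
      simp only [List.cons_append] at h
      obtain ⟨he, ht⟩ := List.cons_prefix_cons.mp h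
      simp only [List.mem_cons, not_or] at ha hb
      obtain ⟨h1, h2⟩ := ih bs x y ha.2 hb.2 ht
      exact ⟨by rw [he, h1], h2⟩

-- a prefix occurrence of the encoded pattern pins the first tokens
lemma pvPrefix (P : List (List Char)) : ∀ (L : List (List Char)),
    (∀ t ∈ P, t ≠ [] ∧ '/' ∉ t) → (∀ t ∈ L, '/' ∉ t) →
    pvFlat P <+: pvFlat L → L.take P.length = P := by
  induction P with
  | nil => intro L _ _ _; simp
  | cons p ps ih =>
    intro L hP hL h
    rw [pvFlat_cons] at h
    cases L with
    | nil =>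
      exfalso
      rw [pvFlat_nil, List.prefix_nil] at h
      have : p = [] := by
        cases p with
        | nil => rfl
        | cons c cs => simp at h
      exact (hP p (by simp)).1 this
    | cons l ls =>
      rw [pvFlat_cons] at h
      obtain ⟨h1, h2⟩ := pvLemD p l (pvFlat ps) (pvFlat ls)
        (hP p (by simp)).2 (hL l (by simp)) h
      have := ih ls (fun t ht => hP t (by simp [ht])) (fun t ht => hL t (by simp [ht])) h2
      simp [h1, this]

-- an occurrence of a '/'-headed pattern cannot start inside a '/'-free block
lemma pvLemC (a : List Char) : ∀ (xs ys : List Char), '/' ∉ a →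
    ('/' :: xs) <:+: (a ++ ys) → ('/' :: xs) <:+: ys := by
  induction a with
  | nil => intro xs ys _ h; simpa using h
  | cons a0 as ih =>
    intro xs ys ha h
    obtain ⟨s, t, hst⟩ := h
    cases s with
    | nil =>
      simp only [List.nil_append, List.cons_append] at hst
      have he : '/' = a0 := by injection hst
      simp only [List.mem_cons, not_or] at ha
      exact absurd he ha.1
    | cons c s' =>
      simp only [List.cons_append] at hst
      have hst' : s' ++ ('/' :: xs) ++ t = as ++ ys := by injection hst
      simp only [List.mem_cons, not_or] at ha
      exact ih xs ys ha.2 ⟨s', t, hst'⟩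

lemma pvInfix_to_window (P : List (List Char)) (L : List (List Char))
    (hP : ∀ t ∈ P, t ≠ [] ∧ '/' ∉ t) (hL : ∀ t ∈ L, '/' ∉ t)
    (h : ('/' :: pvFlat P) <:+: ('/' :: pvFlat L)) :
    ∃ i, (L.drop i).take P.length = P := by
  induction L with
  | nil =>
    refine ⟨0, ?_⟩
    rw [pvFlat_nil] at h
    have hlen : (pvFlat P).length + 1 ≤ 1 := by simpa using h.length_le
    have hP0 : P = [] := (pvFlat_eq_nil_iff P).mp (List.length_eq_zero_iff.mp (by omega))
    simp [hP0]
  | cons l ls ih =>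
    obtain ⟨s, t, hst⟩ := h
    cases s with
    | nil =>
      refine ⟨0, ?_⟩
      have hpre : pvFlat P <+: pvFlat (l :: ls) := by
        have hp : ('/' :: pvFlat P) <+: ('/' :: pvFlat (l :: ls)) := ⟨t, by simpa using hst⟩
        exact (List.cons_prefix_cons.mp hp).2
      simpa using pvPrefix P (l :: ls) hP hL hpre
    | cons c s' =>
      have hst' : s' ++ ('/' :: pvFlat P) ++ t = pvFlat (l :: ls) := by
        simp only [List.cons_append] at hst
        injection hst
      have hinf : ('/' :: pvFlat P) <:+: (l ++ ('/' :: pvFlat ls)) := by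
        rw [pvFlat_cons] at hst'
        exact ⟨s', t, hst'⟩
      have hinf2 : ('/' :: pvFlat P) <:+: ('/' :: pvFlat ls) :=
        pvLemC l (pvFlat P) ('/' :: pvFlat ls) (hL l (by simp)) hinf
      obtain ⟨i, hi⟩ := ih (fun t ht => hL t (by simp [ht])) hinf2
      exact ⟨i + 1, by simpa using hi⟩

lemma pvWindow_to_infix (P : List (List Char)) (L : List (List Char))
    (h : ∃ i, (L.drop i).take P.length = P) :
    ('/' :: pvFlat P) <:+: ('/' :: pvFlat L) := by
  obtain ⟨i, hi⟩ := h
  have hdecomp : L = L.take i ++ (P ++ L.drop (i + P.length)) := by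
    conv_lhs => rw [← List.take_append_drop i L]
    congr 1
    conv_lhs => rw [← List.take_append_drop P.length (L.drop i)]
    rw [hi, List.drop_drop]
  by_cases hu : L.take i = []
  · refine ⟨[], pvFlat (L.drop (i + P.length)), ?_⟩
    conv_rhs => rw [hdecomp, hu]
    simp [pvFlat_append]
  · obtain ⟨w, hw⟩ := pvFlat_snoc (L.take i) hu
    refine ⟨'/' :: w, pvFlat (L.drop (i + P.length)), ?_⟩
    conv_rhs => rw [hdecomp]
    simp [pvFlat_append, hw]

-- main token-level equivalence
lemma pvMain (P L : List (List Char))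
    (hP : ∀ t ∈ P, t ≠ [] ∧ '/' ∉ t) (hL : ∀ t ∈ L, '/' ∉ t) :
    ('/' :: pvFlat P) <:+: ('/' :: pvFlat L) ↔ ∃ i, (L.drop i).take P.length = P :=
  ⟨fun h => pvInfix_to_window P L hP hL h, fun h => pvWindow_to_infix P L h⟩

-- splitOn by '/' produces '/'-free chunks
lemma pvGoFree (fuel : ℕ) : ∀ (l cur : List Char) (acc : List (List Char)),
    l.length < fuel → '/' ∉ cur → (∀ x ∈ acc, '/' ∉ x) →
    ∀ x ∈ PySem.Chars.splitOn.go ['/'] fuel l cur acc, '/' ∉ x := by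
  induction fuel with
  | zero => intro l cur acc hf; omega
  | succ n ih =>
    intro l cur acc hf hc hacc
    cases l with
    | nil =>
      rw [PySem.Chars.splitOn.go.eq_def]
      intro x hx
      simp only [List.mem_reverse, List.mem_cons] at hx
      rcases hx with h | h
      · subst h; simpa using hc
      · exact hacc x h
    | cons c rest =>
      rw [PySem.Chars.splitOn.go.eq_def]
      by_cases hpre : List.isPrefixOf ['/'] (c :: rest) = true
      · simp only [hpre, if_true]
        apply ih
        · simp only [List.length_cons] at hf
          simp
          omega
        · simp
        · intro x hx
          rcases List.mem_cons.mp hx with h | h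
          · subst h; simpa using hc
          · exact hacc x h
      · simp only [hpre, Bool.false_eq_true, if_false]
        have hc' : c ≠ '/' := by
          intro h; subst h
          simp [List.isPrefixOf] at hpre
        apply ih
        · simp only [List.length_cons] at hf ⊢; omega
        · intro h
          rcases List.mem_cons.mp h with h | h
          · exact hc' h.symm
          · exact hc h
        · exact hacc

lemma pvSplitFree (s : List Char) : ∀ x ∈ PySem.Chars.splitOn s ['/'], '/' ∉ x := by
  apply pvGoFree
  · omega
  · simp
  · simp

-- the shared token comprehension, on the char side
lemma pvToksChars (s : String) :
    (pv_tokens s).map String.toList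
      = (PySem.Chars.splitOn s.toList ['/']).filter (fun c => !c.isEmpty) := by
  unfold pv_tokens
  rw [PySem.Str.split?, PySem.Chars.split?]
  simp only [show ("/" : String).toList = ['/'] from rfl, List.isEmpty_cons,
    Bool.false_eq_true, if_false, Option.map_some, Option.getD_some]
  rw [List.filter_map, List.map_map]
  have key : ∀ c : List Char, String.ofList c = "" ↔ c = [] := by
    intro c
    constructor
    · intro h
      have := congrArg String.toList h
      simpa using this
    · intro h; subst h; rfl
  have h1 : (String.toList ∘ String.ofList) = id := by
    funext c; simp
  have h2 : ((fun part => part != "") ∘ String.ofList) = (fun c : List Char => !c.isEmpty) := by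
    funext c
    rw [Bool.eq_iff_iff]
    simp only [Function.comp_apply, bne_iff_ne, ne_eq, Bool.not_eq_true', List.isEmpty_eq_false_iff]
    rw [not_iff_not.mpr (key c)]
  rw [h2, h1, List.map_id]

lemma pvToksFacts (s : String) :
    ∀ t ∈ (pv_tokens s).map String.toList, t ≠ [] ∧ '/' ∉ t := by
  intro t ht
  rw [pvToksChars] at ht
  have h1 := List.of_mem_filter ht
  have h2 := List.mem_of_mem_filter ht
  refine ⟨?_, pvSplitFree s.toList t h2⟩
  simpa [List.isEmpty_eq_false_iff] using h1

-- A's inner sliding-window any, characterised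
lemma pvAnyWindow (L P : List String) :
    ((PySem.List.pyRange 0 ((L.length : Int) - (P.length : Int) + 1) 1).any
        (fun start => PySem.List.slice L (some start) (some (start + (P.length : Int))) == P)
      = true)
      ↔ ∃ i : ℕ, (L.drop i).take P.length = P := by
  rw [List.any_eq_true]
  constructor
  · rintro ⟨start, hmem, hsl⟩
    obtain ⟨h0, _, _⟩ := (PySem.List.mem_pyRange_iff_of_pos (by norm_num) start).mp hmem
    refine ⟨start.toNat, ?_⟩
    rw [beq_iff_eq] at hsl
    rw [PySem.List.slice_toNat L h0 (by omega)] at hsl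
    have harith : (start + (P.length : Int)).toNat - start.toNat = P.length := by omega
    rwa [harith] at hsl
  · rintro ⟨i, hi⟩
    by_cases hP0 : P = []
    · subst hP0
      refine ⟨0, ?_, ?_⟩
      · rw [PySem.List.mem_pyRange_iff_of_pos (by norm_num)]
        refine ⟨le_rfl, ?_, one_dvd _⟩
        simp only [List.length_nil, Nat.cast_zero, sub_zero]
        positivity
      · rw [beq_iff_eq, PySem.List.slice_toNat L le_rfl (by simp)]
        simp
    have hP1 : 0 < P.length := List.length_pos_iff.mpr hP0
    have hlen : i + P.length ≤ L.length := by
      have hc := congrArg List.length hi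
      rw [List.length_take, List.length_drop] at hc
      omega
    refine ⟨(i : Int), ?_, ?_⟩
    · rw [PySem.List.mem_pyRange_iff_of_pos (by norm_num)]
      refine ⟨by positivity, ?_, one_dvd _⟩
      have hc : (i : Int) + (P.length : Int) ≤ (L.length : Int) := by exact_mod_cast hlen
      omega
    · rw [beq_iff_eq, PySem.List.slice_toNat L (by positivity) (by positivity)]
      have harith : ((i : Int) + (P.length : Int)).toNat - (i : Int).toNat = P.length := by omega
      rw [harith]
      simpa using hi

-- windows of strings correspond to windows of their char lists
lemma pvWindowMap (L P : List String) :
    (∃ i : ℕ, (L.drop i).take P.length = P)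
      ↔ (∃ i : ℕ, ((L.map String.toList).drop i).take P.length = P.map String.toList) := by
  have hinj : Function.Injective String.toList := fun a b h => String.toList_inj.mp h
  constructor
  · rintro ⟨i, hi⟩
    refine ⟨i, ?_⟩
    rw [← List.map_drop, ← List.map_take, hi]
  · rintro ⟨i, hi⟩
    refine ⟨i, ?_⟩
    rw [← List.map_drop, ← List.map_take] at hi
    exact List.map_injective_iff.mpr hinj hi

-- intercalate with trailing slash is pvFlat, for nonempty token lists
lemma pvIntercalate (X : List (List Char)) (hX : X ≠ []) :
    List.intercalate ['/'] X ++ ['/'] = pvFlat X := by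
  induction X with
  | nil => simp at hX
  | cons t ts ih =>
    cases ts with
    | nil => simp [List.intercalate, pvFlat]
    | cons a b =>
      have hstep : List.intercalate ['/'] (t :: a :: b) = t ++ ['/'] ++ List.intercalate ['/'] (a :: b) := by
        simp [List.intercalate]
      rw [hstep, pvFlat_cons, ← ih (by simp)]
      simp

-- toList of B's delimited pattern string
lemma pvPatToList (parts : List String) (hne : parts ≠ []) :
    ("/" ++ PySem.Str.join "/" parts ++ "/").toList
      = '/' :: pvFlat (parts.map String.toList) := by
  rw [String.toList_append, String.toList_append, PySem.Str.toList_join]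
  rw [show ("/" : String).toList = ['/'] from rfl]
  rw [PySem.Chars.join]
  rw [List.cons_append, List.nil_append, ← pvIntercalate _ (by simpa using hne)]
  simp

-- per-line equality of the two tests, when the pattern has at least one token
lemma pvPerLine (parts lineParts : List String) (hne : parts ≠ [])
    (hP : ∀ t ∈ parts.map String.toList, t ≠ [] ∧ '/' ∉ t)
    (hL : ∀ t ∈ lineParts.map String.toList, t ≠ [] ∧ '/' ∉ t) :
    (PySem.List.pyRange 0 ((lineParts.length : Int) - (parts.length : Int) + 1) 1).any
        (fun start => PySem.List.slice lineParts (some start) (some (start + (parts.length : Int))) == parts)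
      = PySem.Str.isIn ("/" ++ PySem.Str.join "/" parts ++ "/")
          ("/" ++ PySem.Str.join "/" lineParts ++ "/") := by
  rw [Bool.eq_iff_iff, pvAnyWindow, PySem.Str.isIn_eq, PySem.Chars.isIn_iff_infix]
  rw [pvPatToList parts hne]
  by_cases hLe : lineParts = []
  · subst hLe
    constructor
    · rintro ⟨i, hi⟩
      exfalso
      cases parts with
      | nil => exact hne rfl
      | cons p ps => simp at hi
    · intro h
      exfalso
      have hlen : ('/' :: pvFlat (List.map String.toList parts)).length ≤ 2 := by
        have hh := h.length_le
        rw [show ("/" ++ PySem.Str.join "/" ([] : List String) ++ "/").toList = ['/', '/'] from rfl] at hh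
        simpa using hh
      have h2 : 2 ≤ (pvFlat (parts.map String.toList)).length := by
        cases hp : parts.map String.toList with
        | nil => exact absurd (by simpa using hp) hne
        | cons t ts =>
          have ht : t ≠ [] := (hP t (by rw [hp]; simp)).1
          rw [pvFlat_cons]
          cases t with
          | nil => exact absurd rfl ht
          | cons c cs => simp only [List.cons_append, List.length_cons, List.length_append]; omega
      simp only [List.length_cons] at hlen
      omega
  · rw [pvPatToList lineParts hLe, pvMain _ _ hP (fun t ht => (hL t ht).2)]
    rw [pvWindowMap lineParts parts]
    simp [List.length_map]

-- ===== VERDICT (by name: the statement is the Claim_ definition above) =====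
theorem output_contains_relative_path_py_spec : Claim_equal_output_contains_relative_path_py := by
  intro output_text relative_path _
  unfold Spec_output_contains_relative_path_py
  unfold output_contains_relative_path_py output_contains_relative_path_py_alt
  simp only [List.any_map]
  by_cases hne : (pv_tokens (pv_normalize relative_path)).isEmpty
  · simp only [hne, if_true]
    have hp : pv_tokens (pv_normalize relative_path) = [] := List.isEmpty_iff.mp hne
    rw [hp]
    cases hl : PySem.Str.splitlines output_text with
    | nil => simp
    | cons l ls =>
      simp only [List.isEmpty_cons, Bool.not_false, List.any_eq_true]
      refine ⟨l, by simp, ?_⟩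
      simp only [Function.comp_apply]
      rw [pvAnyWindow]
      exact ⟨0, by simp⟩
  · simp only [hne, Bool.false_eq_true, if_false]
    apply List.any_congr rfl
    intro line
    simp only [Function.comp_apply]
    have hp : pv_tokens (pv_normalize relative_path) ≠ [] := by
      simpa [List.isEmpty_iff] using hne
    exact pvPerLine _ (pv_tokens (pv_normalize line)) hp
      (pvToksFacts _) (pvToksFacts _)
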